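-- pv_equiv track=rewrite | github.com/morningM00N/boardgame | fourcard.py | getActionSpace
-- ===== SOURCE A (Python) =====
-- import itertools
--
-- def getActionSpace(handSize:int=8):
--   items =[]
--   for i in range(handSize):
--       items.append(i)
--
--   actions = []
--   for i in range(1,6):
--     for c in itertools.combinations(items,i):
--       result = ""
--       for z in c:
--         result = result + str(z)
--       actions.append(result)
--   return actions
-- ===== SOURCE B (Python) =====
-- def _extend(handSize, start, remaining, chosen, actions):
--     if remaining == 0:
--         actions.append(''.join(map(str, chosen)))
--         return
--     for j in range(start, handSize):
--         _extend(handSize, j + 1, remaining - 1, chosen + (j,), actions)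
--
--
-- def getActionSpace(handSize: int = 8):
--     actions = []
--     for size in range(1, 6):
--         _extend(handSize, 0, size, (), actions)
--     return actions
-- ===== Notes on version B (the rewrite author's own statement) =====
-- stated objective: alternative
-- what changed: Replaces the itertools.combinations enumeration (materialised index list, tuple iteration, inner concatenation loop) with a recursive backtracking generator that extends a chosen-index tuple and str-joins it at each leaf.
import Mathlib
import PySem

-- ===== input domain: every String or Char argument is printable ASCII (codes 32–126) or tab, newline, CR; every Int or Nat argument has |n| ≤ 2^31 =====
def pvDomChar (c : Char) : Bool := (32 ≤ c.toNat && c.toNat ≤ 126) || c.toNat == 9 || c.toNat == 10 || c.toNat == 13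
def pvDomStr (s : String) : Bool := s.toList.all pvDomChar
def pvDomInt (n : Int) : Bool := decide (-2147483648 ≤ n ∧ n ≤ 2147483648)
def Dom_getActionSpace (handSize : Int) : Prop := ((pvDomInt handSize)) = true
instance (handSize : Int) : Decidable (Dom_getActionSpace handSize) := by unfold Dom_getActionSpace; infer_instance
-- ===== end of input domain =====

-- B replaces the itertools.combinations enumeration with a recursive backtracking
-- generator that joins the chosen index tuple at each leaf (alternative decomposition).

-- ===== PORT A =====
-- itertools.combinations(xs, k) in its documented lexicographic order
def pyCombinations (xs : List Int) : Nat → List (List Int)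
  | 0 => [[]]
  | k + 1 =>
    match xs with
    | [] => []
    | x :: rest => (pyCombinations rest k).map (x :: ·) ++ pyCombinations rest (k + 1)

def getActionSpace (handSize : Int) : List String :=
  let items := (PySem.List.pyRange 0 handSize 1).foldl (fun acc i => acc ++ [i]) []
  (PySem.List.pyRange 1 6 1).foldl (fun actions i =>
    (pyCombinations items i.toNat).foldl (fun acc c =>
      acc ++ [c.foldl (fun result z => result ++ PySem.Int.toStr z) ""]) actions) []

-- ===== PORT B =====
-- _extend(handSize, start, remaining, chosen, actions): appends ''.join(map(str, chosen))
-- when remaining = 0, else loops j over range(start, handSize) recursing with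
-- remaining-1, chosen + (j,) and the same accumulator
def pyExtend (handSize : Int) (start : Int) : Nat → List Int → List String → List String
  | 0, chosen, actions => actions ++ [PySem.Str.join "" (chosen.map PySem.Int.toStr)]
  | k + 1, chosen, actions =>
    (PySem.List.pyRange start handSize 1).foldl
      (fun acc j => pyExtend handSize (j + 1) k (chosen ++ [j]) acc) actions

def getActionSpace_alt (handSize : Int) : List String :=
  (PySem.List.pyRange 1 6 1).foldl (fun actions size => pyExtend handSize 0 size.toNat [] actions) []

-- ===== PRECONDITION & SPEC =====
def Spec_getActionSpace (handSize : Int) (out : List String) : Prop := out = getActionSpace_alt handSize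
instance (handSize : Int) (out : List String) : Decidable (Spec_getActionSpace handSize out) := by unfold Spec_getActionSpace; infer_instance

-- ===== CLAIM (what is proved, stated in full; the proofs are below) =====
def Claim_equal_getActionSpace : Prop := ∀ (handSize : Int), Dom_getActionSpace handSize → Spec_getActionSpace handSize (getActionSpace handSize)

-- ===== LEMMAS AND PROOFS =====

theorem join_empty_chars (l : List (List Char)) : PySem.Chars.join [] l = l.flatten := by
  simp [PySem.Chars.join, List.intercalate]
  induction l with
  | nil => simp
  | cons a t ih => cases t <;> simp_all [List.intersperse]

theorem strjoin_empty (l : List String) :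
    PySem.Str.join "" l = String.ofList ((l.map String.toList).flatten) := by
  simp [PySem.Str.join, join_empty_chars]

theorem strjoin_cons (y : String) (xs : List String) :
    PySem.Str.join "" (y :: xs) = y ++ PySem.Str.join "" xs := by
  simp [strjoin_empty, String.ofList_append]

-- A's inner loop 'result = result + str(z)' computes ''.join(map(str, c))
theorem foldA_eq_join (c : List Int) : ∀ (p : String),
    c.foldl (fun result z => result ++ PySem.Int.toStr z) p
      = p ++ PySem.Str.join "" (c.map PySem.Int.toStr) := by
  induction c with
  | nil => intro p; simp [strjoin_empty]
  | cons z c ih => intro p; simp [List.foldl_cons, ih, strjoin_cons, String.append_assoc]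

-- the heart: B's accumulator-threading recursion appends exactly the joined
-- combinations of range(s, h) after the accumulated prefix
theorem extend_eq_combos (n : Nat) : ∀ (h s : Int) (k : Nat) (chosen : List Int) (actions : List String),
    (h - s).toNat = n →
    pyExtend h s k chosen actions
      = actions ++ (pyCombinations (PySem.List.pyRange s h 1) k).map
          (fun c => PySem.Str.join "" ((chosen ++ c).map PySem.Int.toStr)) := by
  induction n with
  | zero =>
    intro h s k chosen actions hn
    have hle : h ≤ s := by omega
    rw [PySem.List.pyRange_one_eq_nil hle]
    cases k with
    | zero => simp [pyCombinations, pyExtend]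
    | succ k => simp [pyCombinations, pyExtend, PySem.List.pyRange_one_eq_nil hle]
  | succ m ih =>
    intro h s k chosen actions hn
    have hlt : s < h := by omega
    cases k with
    | zero => simp [pyCombinations, pyExtend]
    | succ k =>
      have h1 : ((h : Int) - (s + 1)).toNat = m := by omega
      calc pyExtend h s (k+1) chosen actions
          = (PySem.List.pyRange (s+1) h 1).foldl
              (fun acc j => pyExtend h (j + 1) k (chosen ++ [j]) acc)
              (pyExtend h (s + 1) k (chosen ++ [s]) actions) := by
            rw [show pyExtend h s (k+1) chosen actions
                = (PySem.List.pyRange s h 1).foldl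
                    (fun acc j => pyExtend h (j + 1) k (chosen ++ [j]) acc) actions from rfl,
              PySem.List.pyRange_one_cons hlt, List.foldl_cons]
        _ = pyExtend h (s+1) (k+1) chosen (pyExtend h (s + 1) k (chosen ++ [s]) actions) := rfl
        _ = actions
            ++ (pyCombinations (PySem.List.pyRange (s+1) h 1) k).map
                (fun c => PySem.Str.join "" (((chosen ++ [s]) ++ c).map PySem.Int.toStr))
            ++ (pyCombinations (PySem.List.pyRange (s+1) h 1) (k+1)).map
                (fun c => PySem.Str.join "" ((chosen ++ c).map PySem.Int.toStr)) := by
            rw [ih h (s+1) k (chosen ++ [s]) actions h1,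
              ih h (s+1) (k+1) chosen _ h1, List.append_assoc]
        _ = actions ++ (pyCombinations (PySem.List.pyRange s h 1) (k+1)).map
              (fun c => PySem.Str.join "" ((chosen ++ c).map PySem.Int.toStr)) := by
            rw [PySem.List.pyRange_one_cons hlt]
            simp [pyCombinations, List.map_append, Function.comp]

-- ===== VERDICT (by name: the statement is the Claim_ definition above) =====
theorem getActionSpace_spec : Claim_equal_getActionSpace := by
  intro handSize _
  unfold Spec_getActionSpace getActionSpace getActionSpace_alt
  rw [PySem.List.foldl_append_singleton_eq_self]
  simp only [List.nil_append]
  have hrange : PySem.List.pyRange 1 6 1 = [1, 2, 3, 4, 5] := by decide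
  rw [hrange]
  simp only [List.foldl_cons, List.foldl_nil, PySem.List.foldl_append_singleton_eq_map]
  have hb : ∀ (k : Nat) (actions : List String),
      pyExtend handSize 0 k [] actions
        = actions ++ (pyCombinations (PySem.List.pyRange 0 handSize 1) k).map
            (fun c => PySem.Str.join "" (c.map PySem.Int.toStr)) := by
    intro k actions
    have := extend_eq_combos (handSize - 0).toNat handSize 0 k [] actions rfl
    simpa using this
  have hfun : (List.foldl (fun result z => result ++ PySem.Int.toStr z) "")
      = (fun c : List Int => PySem.Str.join "" (c.map PySem.Int.toStr)) := by
    funext c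
    simpa using foldA_eq_join c ""
  rw [hfun, hb, hb, hb, hb, hb]
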